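-- pv_equiv track=rewrite | github.com/AlexGreason/Transfer | utils/ImplicationGraph.py | getimps
-- ===== SOURCE A (Python) =====
-- def getimps(sources, targets, links):
--     imps = {}
--     for s in sources:
--         imps[s] = set()
--     for link in links:
--         if link[0] in sources and link[1] in targets and link[0] != link[1]:
--             imps[link[0]].add(link[1])
--     return imps
-- ===== SOURCE B (Python) =====
-- def getimps(sources, targets, links):
--     tset = set(targets)
--     pairs = [(link[0], link[1]) for link in links
--              if link[0] in sources and link[1] in tset and link[0] != link[1]]
--     return {s: {t for (u, t) in pairs if u == s} for s in sources}
-- ===== Notes on version B (the rewrite author's own statement) =====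
-- stated objective: alternative
-- what changed: Replaces A's mutable dict filled by one accumulating pass over links with a staged pipeline: prefilter links once into a list of admissible (source,target) pairs against a precomputed target set, then a dict comprehension groups that pair list per source.
-- outside the precondition, e.g. on getimps([1], [2], [()]): A raises IndexError, B raises IndexError; on getimps([1], [2], [(1,)]): A raises IndexError, B raises IndexError
import Mathlib
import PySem

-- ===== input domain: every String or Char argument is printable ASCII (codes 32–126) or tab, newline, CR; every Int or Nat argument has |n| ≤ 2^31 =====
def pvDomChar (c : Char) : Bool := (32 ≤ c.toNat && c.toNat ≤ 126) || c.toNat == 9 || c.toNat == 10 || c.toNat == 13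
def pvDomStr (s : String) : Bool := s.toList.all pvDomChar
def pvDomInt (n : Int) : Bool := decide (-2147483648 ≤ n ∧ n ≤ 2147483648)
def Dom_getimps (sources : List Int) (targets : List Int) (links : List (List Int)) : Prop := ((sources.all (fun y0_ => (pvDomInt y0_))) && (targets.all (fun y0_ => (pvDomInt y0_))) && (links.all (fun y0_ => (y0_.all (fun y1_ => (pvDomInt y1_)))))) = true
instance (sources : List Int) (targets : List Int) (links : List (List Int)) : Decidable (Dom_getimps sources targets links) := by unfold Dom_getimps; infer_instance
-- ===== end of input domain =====

-- B replaces A's single accumulating pass over links into a mutable dict with a staged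
-- pipeline: one prefilter pass producing the admissible (source,target) pairs, then a
-- per-source grouping comprehension (alternative decomposition, same cost).


-- ===== PORT A =====
def getimps (sources : List Int) (targets : List Int) (links : List (List Int)) : List (Int × List Int) :=
  let imps : PySem.Dict Int (PySem.Set Int) :=
    sources.foldl (fun d s => d.insert s PySem.Set.empty) PySem.Dict.empty
  let imps :=
    links.foldl (fun d link =>
      if PySem.List.pyGetD link 0 0 ∈ sources ∧ PySem.List.pyGetD link 1 0 ∈ targets ∧
         PySem.List.pyGetD link 0 0 ≠ PySem.List.pyGetD link 1 0 then
        d.modify (PySem.List.pyGetD link 0 0) PySem.Set.empty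
          (fun st => PySem.Set.add st (PySem.List.pyGetD link 1 0))
      else d) imps
  imps.items

-- ===== PORT B =====
def getimps_alt (sources : List Int) (targets : List Int) (links : List (List Int)) : List (Int × List Int) :=
  let tset : PySem.Set Int := PySem.Set.ofList targets
  let pairs : List (Int × Int) := links.filterMap (fun link =>
    if PySem.List.pyGetD link 0 0 ∈ sources ∧ PySem.List.pyGetD link 1 0 ∈ tset ∧
       PySem.List.pyGetD link 0 0 ≠ PySem.List.pyGetD link 1 0 then
      some (PySem.List.pyGetD link 0 0, PySem.List.pyGetD link 1 0)
    else none)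
  (sources.foldl (fun d s =>
      d.insert s (pairs.foldl (fun acc p =>
        if p.1 = s then PySem.Set.add acc p.2 else acc) PySem.Set.empty))
    (PySem.Dict.empty : PySem.Dict Int (PySem.Set Int))).items

-- ===== PRECONDITION & SPEC =====
-- Pre_ excludes exactly the inputs on which the Python A raises IndexError: an empty link
-- (link[0] raises) or a one-element link whose head is in sources (link[1] raises).
def Pre_getimps (sources : List Int) (targets : List Int) (links : List (List Int)) : Prop :=
  ∀ link ∈ links, link ≠ [] ∧ (link.headI ∈ sources → 2 ≤ link.length)
instance (sources : List Int) (targets : List Int) (links : List (List Int)) : Decidable (Pre_getimps sources targets links) := by unfold Pre_getimps; infer_instance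

def pvWitness_getimps : List Int × List Int × List (List Int) :=
  ([1, 2], [2, 3], [[1, 2], [1, 1], [2, 3], [3, 2]])

def Spec_getimps (sources : List Int) (targets : List Int) (links : List (List Int)) (out : List (Int × List Int)) : Prop := out = getimps_alt sources targets links
instance (sources : List Int) (targets : List Int) (links : List (List Int)) (out : List (Int × List Int)) : Decidable (Spec_getimps sources targets links out) := by unfold Spec_getimps; infer_instance

-- ===== CLAIM (what is proved, stated in full; the proofs are below) =====
def Claim_equal_getimps : Prop := ∀ (sources : List Int) (targets : List Int) (links : List (List Int)), Dom_getimps sources targets links → Pre_getimps sources targets links → Spec_getimps sources targets links (getimps sources targets links)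

-- ===== LEMMAS AND PROOFS =====

-- getD of a dict whose items are keyed as (s, g s): first match already returns g k
lemma getD_mk_map (g : Int → PySem.Set Int) (S : List Int) (k : Int) (d0 : PySem.Set Int)
    (hk : k ∈ S) :
    (PySem.Dict.mk (S.map fun s => (s, g s))).getD k d0 = g k := by
  induction S with
  | nil => cases hk
  | cons a S ih =>
    by_cases ha : a = k
    · subst ha; simp [PySem.Dict.getD, PySem.Dict.get?]
    · have hk' : k ∈ S := by
        rcases List.mem_cons.mp hk with h | h
        · exact absurd h.symm ha
        · exact h
      simpa [PySem.Dict.getD, PySem.Dict.get?, List.find?, ha] using ih hk'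

lemma contains_mk_map (g : Int → PySem.Set Int) (S : List Int) (k : Int) :
    (PySem.Dict.mk (S.map fun s => (s, g s))).contains k = decide (k ∈ S) := by
  rw [PySem.Dict.contains_eq_decide_mem_keys]
  simp [PySem.Dict.keys]

-- an insert loop whose value depends only on the key, from a dict already of that shape
lemma foldl_insert_dict (f : Int → PySem.Set Int) :
    ∀ (xs S : List Int),
      (xs.foldl (fun d s => d.insert s (f s)) (PySem.Dict.mk (S.map fun s => (s, f s))))
        = PySem.Dict.mk ((PySem.Set.update S xs).map fun s => (s, f s)) := by
  intro xs
  induction xs with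
  | nil => intro S; simp [PySem.Set.update]
  | cons x xs ih =>
    intro S
    have hstep : (PySem.Dict.mk (S.map fun s => (s, f s))).insert x (f x)
        = PySem.Dict.mk ((PySem.Set.add S x).map fun s => (s, f s)) := by
      by_cases hx : x ∈ S
      · rw [PySem.Dict.insert]
        simp only [contains_mk_map, hx, decide_true, if_true]
        have : (PySem.Set.add S x) = S := by simp [PySem.Set.add, hx]
        rw [this]
        congr 1
        rw [List.map_map]
        apply List.map_congr_left
        intro s _
        by_cases hs : s = x
        · subst hs; simp
        · simp [Function.comp, hs]
      · rw [PySem.Dict.insert]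
        simp only [contains_mk_map, hx, decide_false]
        have : (PySem.Set.add S x) = S ++ [x] := by simp [PySem.Set.add, hx]
        rw [this]
        simp
    have : (x :: xs).foldl (fun d s => d.insert s (f s)) (PySem.Dict.mk (S.map fun s => (s, f s)))
        = xs.foldl (fun d s => d.insert s (f s)) (PySem.Dict.mk ((PySem.Set.add S x).map fun s => (s, f s))) := by
      simp [List.foldl_cons, hstep]
    rw [this, ih]
    have : PySem.Set.update S (x :: xs) = PySem.Set.update (PySem.Set.add S x) xs := by
      simp [PySem.Set.update]
    rw [this]

-- A's link loop over a dict keyed exactly by the (deduplicated) sources computes,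
-- at each key s, a per-source fold over links
lemma foldl_links_items (sources targets : List Int) :
    ∀ (links : List (List Int)) (g : Int → PySem.Set Int) (S : List Int),
      (∀ k, k ∈ S ↔ k ∈ sources) →
      (links.foldl (fun d link =>
          if PySem.List.pyGetD link 0 0 ∈ sources ∧ PySem.List.pyGetD link 1 0 ∈ targets ∧
             PySem.List.pyGetD link 0 0 ≠ PySem.List.pyGetD link 1 0 then
            d.modify (PySem.List.pyGetD link 0 0) PySem.Set.empty
              (fun st => PySem.Set.add st (PySem.List.pyGetD link 1 0))
          else d) (PySem.Dict.mk (S.map fun s => (s, g s)))).items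
        = S.map (fun s => (s, links.foldl (fun acc link =>
            if PySem.List.pyGetD link 0 0 = s ∧ PySem.List.pyGetD link 1 0 ∈ targets ∧
               PySem.List.pyGetD link 0 0 ≠ PySem.List.pyGetD link 1 0 then
              PySem.Set.add acc (PySem.List.pyGetD link 1 0)
            else acc) (g s))) := by
  intro links
  induction links with
  | nil => intro g S _; rfl
  | cons link rest ih =>
    intro g S hS
    set l0 := PySem.List.pyGetD link 0 0 with hl0
    set l1 := PySem.List.pyGetD link 1 0 with hl1
    by_cases hc : l0 ∈ sources ∧ l1 ∈ targets ∧ l0 ≠ l1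
    · have hl0S : l0 ∈ S := (hS l0).2 hc.1
      have hmod : (PySem.Dict.mk (S.map fun s => (s, g s))).modify l0 PySem.Set.empty
            (fun st => PySem.Set.add st l1)
          = PySem.Dict.mk (S.map fun s =>
              (s, if s = l0 then PySem.Set.add (g s) l1 else g s)) := by
        rw [PySem.Dict.modify, getD_mk_map g S l0 _ hl0S, PySem.Dict.insert]
        simp only [contains_mk_map, hl0S, decide_true, if_true]
        congr 1
        rw [List.map_map]
        apply List.map_congr_left
        intro s _
        by_cases hs : s = l0
        · subst hs; simp
        · simp [Function.comp, hs]
      simp only [List.foldl_cons]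
      rw [if_pos hc, hmod]
      rw [ih (fun s => if s = l0 then PySem.Set.add (g s) l1 else g s) S hS]
      apply List.map_congr_left
      intro s _
      rw [← hl0, ← hl1]
      have hinit : (if s = l0 then PySem.Set.add (g s) l1 else g s)
          = (if l0 = s ∧ l1 ∈ targets ∧ l0 ≠ l1 then PySem.Set.add (g s) l1 else g s) := by
        by_cases hs : s = l0
        · simp [hs, hc.2.1, hc.2.2]
        · have hs' : ¬ l0 = s := fun h => hs h.symm
          simp [hs, hs']
      rw [hinit]
    · simp only [List.foldl_cons]
      rw [← hl0, ← hl1, if_neg hc]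
      rw [ih g S hS]
      apply List.map_congr_left
      intro s hsS
      have hcb : ¬ (l0 = s ∧ l1 ∈ targets ∧ l0 ≠ l1) := by
        rintro ⟨h1, h2, h3⟩
        exact hc ⟨h1 ▸ (hS s).1 hsS, h2, h3⟩
      rw [if_neg hcb]

-- B's per-source fold over the prefiltered pairs equals the per-source fold over links
lemma foldl_pairs_eq (sources targets : List Int) (s : Int) (hs : s ∈ sources) :
    ∀ (links : List (List Int)) (acc : PySem.Set Int),
      ((links.filterMap (fun link =>
          if PySem.List.pyGetD link 0 0 ∈ sources ∧
             PySem.List.pyGetD link 1 0 ∈ PySem.Set.ofList targets ∧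
             PySem.List.pyGetD link 0 0 ≠ PySem.List.pyGetD link 1 0 then
            some (PySem.List.pyGetD link 0 0, PySem.List.pyGetD link 1 0)
          else none)).foldl (fun acc p =>
            if p.1 = s then PySem.Set.add acc p.2 else acc) acc)
        = links.foldl (fun acc link =>
            if PySem.List.pyGetD link 0 0 = s ∧ PySem.List.pyGetD link 1 0 ∈ targets ∧
               PySem.List.pyGetD link 0 0 ≠ PySem.List.pyGetD link 1 0 then
              PySem.Set.add acc (PySem.List.pyGetD link 1 0)
            else acc) acc := by
  intro links
  induction links with
  | nil => intro acc; rfl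
  | cons link rest ih =>
    intro acc
    set l0 := PySem.List.pyGetD link 0 0 with hl0
    set l1 := PySem.List.pyGetD link 1 0 with hl1
    by_cases hc : l0 ∈ sources ∧ l1 ∈ PySem.Set.ofList targets ∧ l0 ≠ l1
    · have hT : l1 ∈ targets := (PySem.Set.mem_ofList targets l1).mp hc.2.1
      rw [show ((link :: rest).filterMap (fun link =>
          if PySem.List.pyGetD link 0 0 ∈ sources ∧
             PySem.List.pyGetD link 1 0 ∈ PySem.Set.ofList targets ∧
             PySem.List.pyGetD link 0 0 ≠ PySem.List.pyGetD link 1 0 then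
            some (PySem.List.pyGetD link 0 0, PySem.List.pyGetD link 1 0)
          else none))
          = (l0, l1) :: (rest.filterMap (fun link =>
          if PySem.List.pyGetD link 0 0 ∈ sources ∧
             PySem.List.pyGetD link 1 0 ∈ PySem.Set.ofList targets ∧
             PySem.List.pyGetD link 0 0 ≠ PySem.List.pyGetD link 1 0 then
            some (PySem.List.pyGetD link 0 0, PySem.List.pyGetD link 1 0)
          else none))
        from by rw [List.filterMap_cons]; rw [← hl0, ← hl1, if_pos hc]]
      rw [List.foldl_cons, List.foldl_cons, ← hl0, ← hl1]
      by_cases hls : l0 = s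
      · rw [if_pos hls]
        rw [if_pos (show l0 = s ∧ l1 ∈ targets ∧ l0 ≠ l1 from ⟨hls, hT, hc.2.2⟩)]
        exact ih _
      · rw [if_neg hls]
        rw [if_neg (show ¬ (l0 = s ∧ l1 ∈ targets ∧ l0 ≠ l1) from fun h => hls h.1)]
        exact ih _
    · have hneg : ¬ (l0 = s ∧ l1 ∈ targets ∧ l0 ≠ l1) := by
        rintro ⟨h1, h2, h3⟩
        exact hc ⟨h1 ▸ hs, (PySem.Set.mem_ofList targets l1).mpr h2, h3⟩
      rw [show ((link :: rest).filterMap (fun link =>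
          if PySem.List.pyGetD link 0 0 ∈ sources ∧
             PySem.List.pyGetD link 1 0 ∈ PySem.Set.ofList targets ∧
             PySem.List.pyGetD link 0 0 ≠ PySem.List.pyGetD link 1 0 then
            some (PySem.List.pyGetD link 0 0, PySem.List.pyGetD link 1 0)
          else none))
          = (rest.filterMap (fun link =>
          if PySem.List.pyGetD link 0 0 ∈ sources ∧
             PySem.List.pyGetD link 1 0 ∈ PySem.Set.ofList targets ∧
             PySem.List.pyGetD link 0 0 ≠ PySem.List.pyGetD link 1 0 then
            some (PySem.List.pyGetD link 0 0, PySem.List.pyGetD link 1 0)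
          else none))
        from by rw [List.filterMap_cons]; rw [← hl0, ← hl1, if_neg hc]]
      rw [List.foldl_cons, ← hl0, ← hl1, if_neg hneg]
      exact ih _

-- ===== VERDICT (by name: the statement is the Claim_ definition above) =====
theorem getimps_spec : Claim_equal_getimps := by
  intro sources targets links _ _
  unfold Spec_getimps
  dsimp only [getimps, getimps_alt]
  have hmemS : ∀ k, k ∈ PySem.Set.update [] sources ↔ k ∈ sources := by
    intro k
    simp [PySem.Set.update, ← PySem.Set.ofList_eq_foldl, PySem.Set.mem_ofList]
  have hA1 : sources.foldl (fun d s => d.insert s PySem.Set.empty)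
        (PySem.Dict.empty : PySem.Dict Int (PySem.Set Int))
      = PySem.Dict.mk ((PySem.Set.update [] sources).map fun s =>
          (s, (fun _ : Int => (PySem.Set.empty : PySem.Set Int)) s)) :=
    foldl_insert_dict (fun _ => PySem.Set.empty) sources []
  have hB1 : sources.foldl (fun d s =>
        d.insert s ((links.filterMap (fun link =>
            if PySem.List.pyGetD link 0 0 ∈ sources ∧
               PySem.List.pyGetD link 1 0 ∈ PySem.Set.ofList targets ∧
               PySem.List.pyGetD link 0 0 ≠ PySem.List.pyGetD link 1 0 then
              some (PySem.List.pyGetD link 0 0, PySem.List.pyGetD link 1 0)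
            else none)).foldl (fun acc p =>
              if p.1 = s then PySem.Set.add acc p.2 else acc) PySem.Set.empty))
        (PySem.Dict.empty : PySem.Dict Int (PySem.Set Int))
      = PySem.Dict.mk ((PySem.Set.update [] sources).map fun s =>
          (s, (links.filterMap (fun link =>
            if PySem.List.pyGetD link 0 0 ∈ sources ∧
               PySem.List.pyGetD link 1 0 ∈ PySem.Set.ofList targets ∧
               PySem.List.pyGetD link 0 0 ≠ PySem.List.pyGetD link 1 0 then
              some (PySem.List.pyGetD link 0 0, PySem.List.pyGetD link 1 0)
            else none)).foldl (fun acc p =>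
              if p.1 = s then PySem.Set.add acc p.2 else acc) PySem.Set.empty)) :=
    foldl_insert_dict _ sources []
  rw [hA1, hB1]
  rw [foldl_links_items sources targets links (fun _ => PySem.Set.empty)
    (PySem.Set.update [] sources) hmemS]
  apply List.map_congr_left
  intro s hsS
  rw [foldl_pairs_eq sources targets s ((hmemS s).1 hsS) links PySem.Set.empty]
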